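-- pv_equiv track=rewrite | github.com/Liz-Nozomi/graduate-dissertation | c-code/Descriptors/hbond_prob.py | hbond_probality
-- ===== SOURCE A (Python) =====
-- def hbond_probality(x):
--     count_0 = 0
--     count_1 = 0
--     count_2 = 0
--     count_3 = 0
--     count_4 = 0
--     count_5 = 0
--     count_6 = 0
--     count_7 = 0
--     count_8 = 0
--     counts_0 = []
--     counts_1 = []
--     counts_2 = []
--     counts_3 = []
--     counts_4 = []
--     counts_5 = []
--     counts_6 = []
--     counts_7 = []
--     counts_8 = []
--
--     for i in range (len(x)):
--         if x[i] == 0: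
--             count_0 = count_0 + 1
--         elif x[i] == 1:
--             count_1 = count_1 + 1
--         elif x[i] == 2:
--             count_2 = count_2 + 1
--         elif x[i] == 3:
--             count_3 = count_3 + 1
--         elif x[i] == 4:
--             count_4 = count_4 + 1
--         elif x[i] == 5:
--             count_5 = count_5 + 1
--         elif x[i] == 6:
--             count_6 = count_6 + 1
--         elif x[i] == 7:
--             count_7 = count_7 + 1
--         else:
--             count_8 = count_8 + 1
--
--     counts_0.append(count_0)
--     counts_1.append(count_1)
--     counts_2.append(count_2)
--     counts_3.append(count_3)
--     counts_4.append(count_4)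
--     counts_5.append(count_5)
--     counts_6.append(count_6)
--     counts_7.append(count_7)
--     counts_8.append(count_8)
--
--     hbond_sum = counts_0 + counts_1 + counts_2 + counts_3 + counts_4 + counts_5 + counts_6 + counts_7 + counts_8
--     return hbond_sum
-- ===== SOURCE B (Python) =====
-- def hbond_probality(x):
--     counts = [x.count(k) for k in range(8)]
--     counts.append(len(x) - sum(counts))
--     return counts
-- ===== Notes on version B (the rewrite author's own statement) =====
-- stated objective: idiomatic
-- what changed: Replaces the single-pass nine-way elif chain over elements by eight staged list.count passes (one per bucket 0-7) and derives the catch-all bucket as len(x) minus the sum of the others.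
import Mathlib
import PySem

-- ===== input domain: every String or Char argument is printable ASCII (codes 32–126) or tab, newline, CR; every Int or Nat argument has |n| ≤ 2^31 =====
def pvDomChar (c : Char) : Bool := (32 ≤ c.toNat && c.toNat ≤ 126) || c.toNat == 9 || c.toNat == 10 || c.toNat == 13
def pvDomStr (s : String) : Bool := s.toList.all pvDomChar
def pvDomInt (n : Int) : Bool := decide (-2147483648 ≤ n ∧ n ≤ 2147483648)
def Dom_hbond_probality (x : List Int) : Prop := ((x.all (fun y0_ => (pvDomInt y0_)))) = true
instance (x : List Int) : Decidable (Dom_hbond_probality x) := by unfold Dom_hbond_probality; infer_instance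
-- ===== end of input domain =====

-- B replaces A's single-pass nine-way elif chain by eight staged x.count(k) passes,
-- deriving the catch-all bucket as len(x) minus the sum of the others (idiomatic; same O(n)).

-- ===== PORT A =====
-- nine scalar counters, updated by the elif chain, then assembled by list concatenation
def hbA_step (s : Int × Int × Int × Int × Int × Int × Int × Int × Int) (v : Int) :
    Int × Int × Int × Int × Int × Int × Int × Int × Int :=
  let (c0, c1, c2, c3, c4, c5, c6, c7, c8) := s
  if v = 0 then (c0 + 1, c1, c2, c3, c4, c5, c6, c7, c8)
  else if v = 1 then (c0, c1 + 1, c2, c3, c4, c5, c6, c7, c8)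
  else if v = 2 then (c0, c1, c2 + 1, c3, c4, c5, c6, c7, c8)
  else if v = 3 then (c0, c1, c2, c3 + 1, c4, c5, c6, c7, c8)
  else if v = 4 then (c0, c1, c2, c3, c4 + 1, c5, c6, c7, c8)
  else if v = 5 then (c0, c1, c2, c3, c4, c5 + 1, c6, c7, c8)
  else if v = 6 then (c0, c1, c2, c3, c4, c5, c6 + 1, c7, c8)
  else if v = 7 then (c0, c1, c2, c3, c4, c5, c6, c7 + 1, c8)
  else (c0, c1, c2, c3, c4, c5, c6, c7, c8 + 1)

def hbond_probality (x : List Int) : List Int :=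
  let s := x.foldl hbA_step (0, 0, 0, 0, 0, 0, 0, 0, 0)
  let (c0, c1, c2, c3, c4, c5, c6, c7, c8) := s
  [c0] ++ [c1] ++ [c2] ++ [c3] ++ [c4] ++ [c5] ++ [c6] ++ [c7] ++ [c8]

-- ===== PORT B =====
-- [x.count(k) for k in range(8)], then append len(x) - sum(counts)
def hbond_probality_alt (x : List Int) : List Int :=
  let counts := (PySem.List.pyRange 0 8 1).map (fun k => (PySem.List.count x k : Int))
  counts ++ [(x.length : Int) - counts.sum]

-- ===== PRECONDITION & SPEC =====
def Spec_hbond_probality (x : List Int) (out : List Int) : Prop := out = hbond_probality_alt x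
instance (x : List Int) (out : List Int) : Decidable (Spec_hbond_probality x out) := by unfold Spec_hbond_probality; infer_instance

-- ===== CLAIM (what is proved, stated in full; the proofs are below) =====
def Claim_equal_hbond_probality : Prop := ∀ (x : List Int), Dom_hbond_probality x → Spec_hbond_probality x (hbond_probality x)

-- ===== LEMMAS AND PROOFS =====

def hbCnt (i : Int) (x : List Int) : Int := (x.count i : Int)

lemma hbCnt_cons (i a : Int) (t : List Int) :
    hbCnt i (a :: t) = hbCnt i t + (if a = i then 1 else 0) := by
  simp [hbCnt, List.count_cons]

lemma hbA_fold (x : List Int) :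
    ∀ c0 c1 c2 c3 c4 c5 c6 c7 c8 : Int,
    x.foldl hbA_step (c0, c1, c2, c3, c4, c5, c6, c7, c8) =
      (c0 + hbCnt 0 x, c1 + hbCnt 1 x, c2 + hbCnt 2 x, c3 + hbCnt 3 x,
       c4 + hbCnt 4 x, c5 + hbCnt 5 x, c6 + hbCnt 6 x, c7 + hbCnt 7 x,
       c8 + ((x.length : Int) - (hbCnt 0 x + hbCnt 1 x + hbCnt 2 x + hbCnt 3 x +
             hbCnt 4 x + hbCnt 5 x + hbCnt 6 x + hbCnt 7 x))) := by
  induction x with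
  | nil => intro _ _ _ _ _ _ _ _ _; simp [hbCnt]
  | cons a t ih =>
    intro c0 c1 c2 c3 c4 c5 c6 c7 c8
    simp only [List.foldl_cons, hbA_step]
    split_ifs with h0 h1 h2 h3 h4 h5 h6 h7 <;>
      rw [ih] <;>
      simp only [hbCnt_cons, List.length_cons, Prod.mk.injEq] <;>
      and_intros <;> split_ifs <;> omega

lemma hbB_counts (x : List Int) :
    (PySem.List.pyRange 0 8 1).map (fun k => (PySem.List.count x k : Int)) =
      [hbCnt 0 x, hbCnt 1 x, hbCnt 2 x, hbCnt 3 x,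
       hbCnt 4 x, hbCnt 5 x, hbCnt 6 x, hbCnt 7 x] := by
  rw [show PySem.List.pyRange 0 8 1 = [0, 1, 2, 3, 4, 5, 6, 7] from by decide]
  simp [PySem.List.count, hbCnt]

-- ===== VERDICT (by name: the statement is the Claim_ definition above) =====
theorem hbond_probality_spec : Claim_equal_hbond_probality := by
  intro x _
  unfold Spec_hbond_probality hbond_probality hbond_probality_alt
  simp only [hbA_fold, hbB_counts, zero_add, List.sum_cons, List.sum_nil,
    List.cons_append, List.nil_append, List.cons.injEq]
  and_intros <;> first | trivial | ring
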